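-- pv_equiv track=rewrite | github.com/Toton-dhibar/Ytdapp | app.py | deduplicate_video_formats_by_height
-- ===== SOURCE A (Python) =====
-- PLATFORMS_REQUIRE_H264 = {'facebook', 'instagram', 'tiktok', 'twitter'}
--
-- def platform_requires_h264(platform):
--     return platform in PLATFORMS_REQUIRE_H264
--
-- def deduplicate_video_formats_by_height(video_formats, platform):
--     """For social media platforms, keep only the best format per resolution height."""
--     if not platform_requires_h264(platform):
--         return video_formats
--
--     seen = {}
--     for fmt in video_formats:
--         height = fmt.get('height') or 0
--         if height not in seen:
--             seen[height] = fmt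
--         else:
--             # Prefer the format with the larger filesize (better quality)
--             if (fmt.get('filesize_approx') or 0) > (seen[height].get('filesize_approx') or 0):
--                 seen[height] = fmt
--
--     return sorted(seen.values(), key=lambda x: x.get('height') or 0, reverse=True)
-- ===== SOURCE B (Python) =====
-- PLATFORMS_REQUIRE_H264 = {'facebook', 'instagram', 'tiktok', 'twitter'}
--
--
-- def deduplicate_video_formats_by_height(video_formats, platform):
--     """Best format per height via recursive partitioning instead of a dict pass."""
--     if platform not in PLATFORMS_REQUIRE_H264:
--         return video_formats
--
--     def height(f):
--         return f.get('height') or 0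
--
--     def size(f):
--         return f.get('filesize_approx') or 0
--
--     def reps(formats):
--         if not formats:
--             return []
--         head, tail = formats[0], formats[1:]
--         h = height(head)
--         best = head
--         for f in tail:
--             if height(f) == h and size(f) > size(best):
--                 best = f
--         return [best] + reps([f for f in tail if height(f) != h])
--
--     out = reps(video_formats)
--     out.sort(key=height, reverse=True)
--     return out
-- ===== Notes on version B (the rewrite author's own statement) =====
-- stated objective: alternative
-- what changed: Replaces A's dict-accumulating single pass (best-per-height map, then sort of the values) by a recursive partition: take the head's height, scan the tail once for the largest-filesize format of that height, recurse on the formats of the other heights, then sort the representatives by height descending.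
import Mathlib
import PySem

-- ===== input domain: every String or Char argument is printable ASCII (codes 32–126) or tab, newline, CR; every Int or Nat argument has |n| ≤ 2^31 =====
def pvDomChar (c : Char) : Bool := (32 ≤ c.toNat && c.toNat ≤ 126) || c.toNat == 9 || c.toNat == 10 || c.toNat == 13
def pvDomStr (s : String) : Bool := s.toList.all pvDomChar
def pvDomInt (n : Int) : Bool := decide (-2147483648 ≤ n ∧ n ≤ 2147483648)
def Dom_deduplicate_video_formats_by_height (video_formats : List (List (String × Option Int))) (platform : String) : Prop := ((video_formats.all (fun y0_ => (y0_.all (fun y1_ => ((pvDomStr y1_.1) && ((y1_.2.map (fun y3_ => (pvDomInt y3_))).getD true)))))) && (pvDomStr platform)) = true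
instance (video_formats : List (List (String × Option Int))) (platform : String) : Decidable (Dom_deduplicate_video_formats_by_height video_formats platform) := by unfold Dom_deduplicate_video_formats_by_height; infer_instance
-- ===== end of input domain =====

-- B replaces A's dict-accumulating pass by a recursive partition (best of the head's
-- height group, then recurse on the rest); objective: alternative algorithm, same cost class.

-- ===== PORT A =====
-- `fmt.get(k) or 0` : first-match association-list lookup, None (and a missing key) coerced to 0
def pvGetOr0 (fmt : List (String × Option Int)) (k : String) : Int :=
  match (PySem.Dict.mk fmt).get? k with
  | some (some v) => v
  | _ => 0

def pvHeight (f : List (String × Option Int)) : Int := pvGetOr0 f "height"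

def pvSize (f : List (String × Option Int)) : Int := pvGetOr0 f "filesize_approx"

def platform_requires_h264 (platform : String) : Bool :=
  ["facebook", "instagram", "tiktok", "twitter"].contains platform

-- the body of A's `for fmt in video_formats` loop
def pvStepA (seen : PySem.Dict Int (List (String × Option Int)))
    (fmt : List (String × Option Int)) : PySem.Dict Int (List (String × Option Int)) :=
  let height := pvHeight fmt
  if seen.contains height = false then seen.insert height fmt
  else if pvSize fmt > pvSize (seen.getD height []) then seen.insert height fmt
  else seen

def deduplicate_video_formats_by_height (video_formats : List (List (String × Option Int))) (platform : String) : List (List (String × Option Int)) :=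
  if platform_requires_h264 platform = false then video_formats
  else
    let seen := video_formats.foldl pvStepA PySem.Dict.empty
    PySem.List.sorted seen.values pvHeight true

-- ===== PORT B =====
-- `reps`: best format of the head's height group, then recurse on the formats of other heights
def pvReps : List (List (String × Option Int)) → List (List (String × Option Int))
  | [] => []
  | head :: tail =>
      tail.foldl (fun b f => if pvHeight f == pvHeight head && pvSize f > pvSize b then f else b) head
        :: pvReps (tail.filter (fun f => pvHeight f != pvHeight head))
termination_by xs => xs.length
decreasing_by
  simpa using Nat.lt_succ_of_le (List.length_filter_le _ _)

def deduplicate_video_formats_by_height_alt (video_formats : List (List (String × Option Int))) (platform : String) : List (List (String × Option Int)) :=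
  if platform_requires_h264 platform = false then video_formats
  else PySem.List.sorted (pvReps video_formats) pvHeight true

-- ===== PRECONDITION & SPEC =====
def Spec_deduplicate_video_formats_by_height (video_formats : List (List (String × Option Int))) (platform : String) (out : List (List (String × Option Int))) : Prop := out = deduplicate_video_formats_by_height_alt video_formats platform
instance (video_formats : List (List (String × Option Int))) (platform : String) (out : List (List (String × Option Int))) : Decidable (Spec_deduplicate_video_formats_by_height video_formats platform out) := by unfold Spec_deduplicate_video_formats_by_height; infer_instance

-- ===== CLAIM (what is proved, stated in full; the proofs are below) =====
def Claim_equal_deduplicate_video_formats_by_height : Prop := ∀ (video_formats : List (List (String × Option Int))) (platform : String), Dom_deduplicate_video_formats_by_height video_formats platform → Spec_deduplicate_video_formats_by_height video_formats platform (deduplicate_video_formats_by_height video_formats platform)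

-- ===== LEMMAS AND PROOFS =====

-- the plain (unguarded) max-by-filesize fold, used to characterise both programs
def pvBestF (b : List (String × Option Int)) (ys : List (List (String × Option Int))) :
    List (String × Option Int) :=
  ys.foldl (fun b f => if pvSize f > pvSize b then f else b) b

lemma pv_guard (h : Int) (tail : List (List (String × Option Int))) :
    ∀ b, tail.foldl (fun b f => if pvHeight f == h && pvSize f > pvSize b then f else b) b
      = pvBestF b (tail.filter (fun f => pvHeight f == h)) := by
  induction tail with
  | nil => intro b; rfl
  | cons f t ih =>
      intro b
      by_cases hf : (pvHeight f == h) = true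
      · rw [List.foldl_cons, List.filter_cons_of_pos (by simp [hf])]
        have hb : (if (pvHeight f == h && pvSize f > pvSize b) = true then f else b)
            = if pvSize f > pvSize b then f else b := by simp [hf]
        rw [hb,
          show pvBestF b (f :: List.filter (fun f => pvHeight f == h) t)
            = pvBestF (if pvSize f > pvSize b then f else b)
                (List.filter (fun f => pvHeight f == h) t) from rfl]
        exact ih _
      · have hf' : (pvHeight f == h) = false := by simpa using hf
        rw [List.foldl_cons, List.filter_cons_of_neg (by simp [hf'])]
        have hb : (if (pvHeight f == h && pvSize f > pvSize b) = true then f else b) = b := by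
          simp [hf']
        rw [hb]
        exact ih b

lemma pv_contains_eq_keys_any (d : PySem.Dict Int (List (String × Option Int))) (k : Int) :
    d.contains k = d.keys.any (fun a => a == k) := by
  simp only [PySem.Dict.contains, PySem.Dict.keys, List.any_map]
  rfl

lemma pv_not_mem_keys (d : PySem.Dict Int (List (String × Option Int))) (k : Int)
    (hc : d.contains k = false) : k ∉ d.keys := by
  rw [pv_contains_eq_keys_any] at hc
  simp only [List.any_eq_false] at hc
  intro hk
  exact absurd (beq_self_eq_true k) (by simpa using hc k hk)

lemma pv_keys_insert_not_contains (d : PySem.Dict Int (List (String × Option Int)))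
    (k : Int) (v : List (String × Option Int)) (hc : d.contains k = false) :
    (d.insert k v).keys = d.keys ++ [k] := by
  simp [PySem.Dict.insert, hc, PySem.Dict.keys]

lemma pv_keys_insert_contains (d : PySem.Dict Int (List (String × Option Int)))
    (k : Int) (v : List (String × Option Int)) (hc : d.contains k = true) :
    (d.insert k v).keys = d.keys := by
  have hins : d.insert k v
      = PySem.Dict.mk (d.items.map (fun p => if (p.1 == k) = true then (k, v) else p)) := by
    simp [PySem.Dict.insert, hc]
  rw [hins]
  simp only [PySem.Dict.keys, List.map_map]
  refine List.map_congr_left ?_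
  intro p _
  simp only [Function.comp_apply]
  by_cases hp : (p.1 == k) = true
  · rw [if_pos hp]
    exact (eq_of_beq hp).symm
  · rw [if_neg hp]

lemma pv_contains_insert_contains (d : PySem.Dict Int (List (String × Option Int)))
    (k : Int) (v : List (String × Option Int)) (hc : d.contains k = true) (j : Int) :
    (d.insert k v).contains j = d.contains j := by
  rw [pv_contains_eq_keys_any, pv_contains_eq_keys_any, pv_keys_insert_contains d k v hc]

lemma pv_contains_insert_not_contains (d : PySem.Dict Int (List (String × Option Int)))
    (k : Int) (v : List (String × Option Int)) (hc : d.contains k = false) (j : Int) :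
    (d.insert k v).contains j = (d.contains j || (k == j)) := by
  rw [pv_contains_eq_keys_any, pv_contains_eq_keys_any, pv_keys_insert_not_contains d k v hc]
  simp

lemma pv_values_foldl : ∀ (xs : List (List (String × Option Int)))
    (d : PySem.Dict Int (List (String × Option Int))), d.keys.Nodup →
    (xs.foldl pvStepA d).values =
      d.keys.map (fun k => pvBestF (d.getD k []) (xs.filter (fun f => pvHeight f == k)))
        ++ pvReps (xs.filter (fun f => !(d.contains (pvHeight f)))) := by
  intro xs
  induction xs with
  | nil =>
      intro d hnd
      simpa [pvReps, pvBestF] using PySem.Dict.values_eq_map_keys d hnd []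
  | cons x xs ih =>
      intro d hnd
      rw [List.foldl_cons]
      by_cases hc : d.contains (pvHeight x) = true
      · by_cases hgt : pvSize x > pvSize (d.getD (pvHeight x) [])
        · -- overwrite in place
          have hstep : pvStepA d x = d.insert (pvHeight x) x := by
            simp [pvStepA, hc, hgt]
          have hnd' : (d.insert (pvHeight x) x).keys.Nodup := by
            rw [pv_keys_insert_contains d _ x hc]; exact hnd
          rw [hstep, ih _ hnd', pv_keys_insert_contains d _ x hc]
          congr 1
          · refine List.map_congr_left ?_
            intro k hk
            by_cases hkx : (pvHeight x == k) = true
            · have heq : pvHeight x = k := eq_of_beq hkx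
              subst heq
              rw [List.filter_cons_of_pos (by simp), PySem.Dict.getD_insert_self,
                show pvBestF (d.getD (pvHeight x) [])
                    (x :: List.filter (fun f => pvHeight f == pvHeight x) xs)
                  = pvBestF (if pvSize x > pvSize (d.getD (pvHeight x) []) then x
                      else d.getD (pvHeight x) [])
                    (List.filter (fun f => pvHeight f == pvHeight x) xs) from rfl,
                if_pos hgt]
            · have hne : k ≠ pvHeight x := fun h => hkx (h ▸ beq_self_eq_true k)
              rw [List.filter_cons_of_neg (by simpa using hkx),
                PySem.Dict.getD_insert_of_ne d x [] hne]
          · have hx : (!(d.contains (pvHeight x))) = false := by simp [hc]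
            rw [List.filter_cons_of_neg (by simp [hx])]
            congr 1
            refine List.filter_congr ?_
            intro f _
            rw [pv_contains_insert_contains d _ x hc]
        · -- keep the old entry
          have hstep : pvStepA d x = d := by simp [pvStepA, hc, hgt]
          rw [hstep, ih _ hnd]
          congr 1
          · refine List.map_congr_left ?_
            intro k hk
            by_cases hkx : (pvHeight x == k) = true
            · have heq : pvHeight x = k := eq_of_beq hkx
              subst heq
              rw [List.filter_cons_of_pos (by simp),
                show pvBestF (d.getD (pvHeight x) [])
                    (x :: List.filter (fun f => pvHeight f == pvHeight x) xs)
                  = pvBestF (if pvSize x > pvSize (d.getD (pvHeight x) []) then x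
                      else d.getD (pvHeight x) [])
                    (List.filter (fun f => pvHeight f == pvHeight x) xs) from rfl,
                if_neg hgt]
            · rw [List.filter_cons_of_neg (by simpa using hkx)]
          · rw [List.filter_cons_of_neg (by simp [hc])]
      · -- new height: append
        have hc' : d.contains (pvHeight x) = false := by simpa using hc
        have hstep : pvStepA d x = d.insert (pvHeight x) x := by simp [pvStepA, hc']
        have hmem : pvHeight x ∉ d.keys := pv_not_mem_keys d _ hc'
        have hnd' : (d.insert (pvHeight x) x).keys.Nodup := by
          rw [pv_keys_insert_not_contains d _ x hc']
          simp [List.nodup_append, hnd]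
          exact fun a ha h => hmem (h ▸ ha)
        rw [hstep, ih _ hnd', pv_keys_insert_not_contains d _ x hc', List.map_append]
        have hfilter_cons :
            (x :: xs).filter (fun f => !(d.contains (pvHeight f)))
              = x :: xs.filter (fun f => !(d.contains (pvHeight f))) :=
          List.filter_cons_of_pos (by simp [hc'])
        rw [hfilter_cons]
        -- unfold one step of pvReps on `x :: (xs.filter ¬contains_d)`
        rw [show pvReps (x :: xs.filter (fun f => !(d.contains (pvHeight f))))
              = (xs.filter (fun f => !(d.contains (pvHeight f)))).foldl
                  (fun b f => if pvHeight f == pvHeight x && pvSize f > pvSize b then f else b) x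
                :: pvReps ((xs.filter (fun f => !(d.contains (pvHeight f)))).filter
                    (fun f => pvHeight f != pvHeight x)) from by rw [pvReps]]
        rw [pv_guard]
        have hfil1 : (xs.filter (fun f => !(d.contains (pvHeight f)))).filter
            (fun f => pvHeight f == pvHeight x) = xs.filter (fun f => pvHeight f == pvHeight x) := by
          rw [List.filter_filter]
          refine List.filter_congr ?_
          intro f _
          by_cases hfx : pvHeight f == pvHeight x
          · have : pvHeight f = pvHeight x := eq_of_beq hfx
            simp [this, hc']
          · simp [hfx]
        have hfil2 : (xs.filter (fun f => !(d.contains (pvHeight f)))).filter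
            (fun f => pvHeight f != pvHeight x)
            = xs.filter (fun f => !((d.insert (pvHeight x) x).contains (pvHeight f))) := by
          rw [List.filter_filter]
          refine List.filter_congr ?_
          intro f _
          rw [pv_contains_insert_not_contains d _ x hc']
          by_cases hfx : pvHeight f = pvHeight x
          · simp [hfx, bne]
          · have h1 : (pvHeight f == pvHeight x) = false := by simpa using hfx
            have h2 : (pvHeight x == pvHeight f) = false := by
              simpa using fun h => hfx h.symm
            simp [bne, h1, h2]
        rw [hfil1, hfil2]
        have hmap : d.keys.map (fun k => pvBestF ((d.insert (pvHeight x) x).getD k [])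
              (xs.filter (fun f => pvHeight f == k)))
            = d.keys.map (fun k => pvBestF (d.getD k [])
              ((x :: xs).filter (fun f => pvHeight f == k))) := by
          refine List.map_congr_left ?_
          intro k hk
          have hne : k ≠ pvHeight x := fun h => hmem (h ▸ hk)
          have hkx : (pvHeight x == k) = false := by
            simpa using fun h => hne h.symm
          rw [PySem.Dict.getD_insert_of_ne d x [] hne,
            List.filter_cons_of_neg (by simp [hkx])]
        rw [hmap]
        simp only [List.map_cons, List.map_nil, PySem.Dict.getD_insert_self,
          List.append_assoc, List.singleton_append]

lemma pv_values_eq_pvReps (vf : List (List (String × Option Int))) :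
    (vf.foldl pvStepA PySem.Dict.empty).values = pvReps vf := by
  have h := pv_values_foldl vf PySem.Dict.empty (by simp [PySem.Dict.keys, PySem.Dict.empty])
  simpa [PySem.Dict.empty, PySem.Dict.keys, PySem.Dict.contains, List.filter_true] using h

-- ===== VERDICT (by name: the statement is the Claim_ definition above) =====
theorem deduplicate_video_formats_by_height_spec : Claim_equal_deduplicate_video_formats_by_height := by
  intro video_formats platform _
  unfold Spec_deduplicate_video_formats_by_height
  unfold deduplicate_video_formats_by_height deduplicate_video_formats_by_height_alt
  by_cases hp : platform_requires_h264 platform = false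
  · simp [hp]
  · simp only [if_neg hp]
    rw [pv_values_eq_pvReps]
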